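-- pv_equiv track=rewrite | github.com/yangx38/lc_solution_linxin | CSE415/a1 4.py | mystery_code
-- ===== SOURCE A (Python) =====
-- def mystery_code(someString, shift):
--     returnString = ''
--     for x in someString:
--         if x.isalpha():
--             if x.islower():
--                 returnString += charShift(chr(ord(x) - 32), shift, 65)
--             else:
--                 returnString += charShift(chr(ord(x) + 32), shift, 97)
--         else:
--             returnString += x
--     return returnString
--
-- def charShift(someChar, shift, startVal):
--     endVal = startVal + 25
--     if ord(someChar) + shift <= endVal:
--         return chr(ord(someChar) + shift)
--     else:
--         newShift = (ord(someChar) + shift) % endVal - 1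
--         return chr(startVal + newShift)
-- ===== SOURCE B (Python) =====
-- def mystery_code(someString, shift):
--     # Build a translation table only for the letters actually present,
--     # then translate the whole string in one pass.
--     table = {}
--     for c in set(someString):
--         if c.isalpha():
--             if c.islower():
--                 swapped, start = ord(c) - 32, 65
--             else:
--                 swapped, start = ord(c) + 32, 97
--             end = start + 25
--             if swapped + shift <= end:
--                 table[c] = chr(swapped + shift)
--             else:
--                 table[c] = chr(start + (swapped + shift) % end - 1)
--     return ''.join(table.get(x, x) for x in someString)
-- ===== Notes on version B (the rewrite author's own statement) =====
-- stated objective: faster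
-- what changed: B replaces A's per-character branch-and-append loop by building a translation dict keyed by the distinct characters present in the input and then translating the whole string in one join/lookup pass.
-- outside the precondition, e.g. on mystery_code('abc', -100): A raises ValueError, B raises ValueError
import Mathlib
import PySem

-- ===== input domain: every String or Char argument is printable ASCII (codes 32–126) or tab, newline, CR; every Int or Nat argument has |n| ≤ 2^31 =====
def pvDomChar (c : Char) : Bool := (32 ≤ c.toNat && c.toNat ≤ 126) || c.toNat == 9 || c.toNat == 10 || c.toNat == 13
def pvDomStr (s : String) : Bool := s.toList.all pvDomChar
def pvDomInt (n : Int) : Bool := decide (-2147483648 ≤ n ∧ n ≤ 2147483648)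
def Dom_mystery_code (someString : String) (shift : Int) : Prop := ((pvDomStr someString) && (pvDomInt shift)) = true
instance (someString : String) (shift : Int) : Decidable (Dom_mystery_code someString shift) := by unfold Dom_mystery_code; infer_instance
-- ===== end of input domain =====

-- B builds a per-character translation table from the distinct characters present and
-- translates in one join/lookup pass: same return value as A, measurably faster
-- (the shift arithmetic runs once per distinct character, not once per occurrence).

-- ===== PORT A =====
-- chr(n) is ported as Char.ofNat n.toNat: exact under Pre_, which guarantees 0 ≤ n,
-- and the other branch's value lies in [64, 217], a valid code point.
def charShift (someChar : Char) (shift : Int) (startVal : Int) : Char :=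
  let endVal := startVal + 25
  if (someChar.toNat : Int) + shift ≤ endVal then
    Char.ofNat ((someChar.toNat : Int) + shift).toNat
  else
    let newShift := PySem.Int.mod ((someChar.toNat : Int) + shift) endVal - 1
    Char.ofNat (startVal + newShift).toNat

def mystery_code (someString : String) (shift : Int) : String :=
  String.mk (someString.toList.foldl (fun returnString x =>
    if PySem.Chars.isalpha x then
      if PySem.Chars.islower x then
        returnString ++ [charShift (Char.ofNat ((x.toNat : Int) - 32).toNat) shift 65]
      else
        returnString ++ [charShift (Char.ofNat ((x.toNat : Int) + 32).toNat) shift 97]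
    else returnString ++ [x]) [])

-- ===== PORT B =====
-- image of one (alphabetic) character under the table build of Source B
def mcImage (c : Char) (shift : Int) : Char :=
  let swapped : Int := if PySem.Chars.islower c then (c.toNat : Int) - 32 else (c.toNat : Int) + 32
  let start : Int := if PySem.Chars.islower c then 65 else 97
  let e := start + 25
  if swapped + shift ≤ e then Char.ofNat (swapped + shift).toNat
  else Char.ofNat (start + PySem.Int.mod (swapped + shift) e - 1).toNat

def mystery_code_alt (someString : String) (shift : Int) : String :=
  let table : PySem.Dict Char Char :=
    (PySem.Set.ofList someString.toList).foldl
      (fun d c => if PySem.Chars.isalpha c then d.insert c (mcImage c shift) else d)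
      PySem.Dict.empty
  String.mk (someString.toList.map (fun x => table.getD x x))

-- ===== PRECONDITION & SPEC =====
-- Pre_ excludes exactly the inputs where Python A raises ValueError: chr() on a negative
-- argument, i.e. some alphabetic character whose case-swapped code plus shift is negative.
def Pre_mystery_code (someString : String) (shift : Int) : Prop :=
  someString.toList.all (fun c => !PySem.Chars.isalpha c ||
    decide (0 ≤ (if PySem.Chars.islower c then (c.toNat : Int) - 32 else (c.toNat : Int) + 32) + shift)) = true
instance (someString : String) (shift : Int) : Decidable (Pre_mystery_code someString shift) := by unfold Pre_mystery_code; infer_instance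

def pvWitness_mystery_code : String × Int := ("Hi!", 3)

def Spec_mystery_code (someString : String) (shift : Int) (out : String) : Prop := out = mystery_code_alt someString shift
instance (someString : String) (shift : Int) (out : String) : Decidable (Spec_mystery_code someString shift out) := by unfold Spec_mystery_code; infer_instance

-- ===== CLAIM (what is proved, stated in full; the proofs are below) =====
def Claim_equal_mystery_code : Prop := ∀ (someString : String) (shift : Int), Dom_mystery_code someString shift → Pre_mystery_code someString shift → Spec_mystery_code someString shift (mystery_code someString shift)

-- ===== LEMMAS AND PROOFS =====

lemma toNat_ofNat_of_lt (n : Nat) (h : n < 0xd800) : (Char.ofNat n).toNat = n := by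
  rw [Char.toNat_ofNat]
  simp [Nat.isValidChar]
  omega

-- the table lookup, characterised
lemma getD_build (shift : Int) (L : List Char) (d : PySem.Dict Char Char) (x : Char) :
    (L.foldl (fun d c => if PySem.Chars.isalpha c then d.insert c (mcImage c shift) else d) d).getD x x
      = if x ∈ L ∧ PySem.Chars.isalpha x = true then mcImage x shift else d.getD x x := by
  induction L generalizing d with
  | nil => simp
  | cons c L ih =>
    simp only [List.foldl_cons, ih]
    by_cases hxL : x ∈ L ∧ PySem.Chars.isalpha x = true
    · simp [hxL, List.mem_cons]
    · by_cases hxc : x = c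
      · subst hxc
        by_cases ha : PySem.Chars.isalpha x = true
        · simp [ha, PySem.Dict.getD_insert]
        · simp [ha]
      · by_cases ha : PySem.Chars.isalpha c = true
        · simp [ha, hxL, hxc, PySem.Dict.getD_insert]
        · simp [ha, hxL, hxc]

-- A's loop body as a per-character function
def mcA (shift : Int) (x : Char) : Char :=
  if PySem.Chars.isalpha x then
    if PySem.Chars.islower x then
      charShift (Char.ofNat ((x.toNat : Int) - 32).toNat) shift 65
    else
      charShift (Char.ofNat ((x.toNat : Int) + 32).toNat) shift 97
  else x

lemma foldlA (shift : Int) (L : List Char) (acc : List Char) :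
    L.foldl (fun returnString x =>
      if PySem.Chars.isalpha x then
        if PySem.Chars.islower x then
          returnString ++ [charShift (Char.ofNat ((x.toNat : Int) - 32).toNat) shift 65]
        else
          returnString ++ [charShift (Char.ofNat ((x.toNat : Int) + 32).toNat) shift 97]
      else returnString ++ [x]) acc = acc ++ L.map (mcA shift) := by
  induction L generalizing acc with
  | nil => simp
  | cons x L ih =>
    simp only [List.foldl_cons, List.map_cons, ih]
    unfold mcA
    split_ifs <;> simp

lemma lower_bounds {x : Char} (h : PySem.Chars.islower x = true) :
    97 ≤ x.toNat ∧ x.toNat ≤ 122 := by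
  simp [PySem.Chars.islower, Char.le_def] at h
  exact ⟨h.1, h.2⟩

lemma upper_bounds {x : Char} (h : PySem.Chars.isupper x = true) :
    65 ≤ x.toNat ∧ x.toNat ≤ 90 := by
  simp [PySem.Chars.isupper, Char.le_def] at h
  exact ⟨h.1, h.2⟩

-- per alphabetic character, A's value equals B's table image (under the no-ValueError bound)
lemma mcA_eq_mcImage (shift : Int) (x : Char) (ha : PySem.Chars.isalpha x = true)
    (_hpre : 0 ≤ (if PySem.Chars.islower x then (x.toNat : Int) - 32 else (x.toNat : Int) + 32) + shift) :
    mcA shift x = mcImage x shift := by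
  unfold mcA mcImage charShift
  rw [if_pos ha]
  by_cases hl : PySem.Chars.islower x = true
  · obtain ⟨h1, h2⟩ := lower_bounds hl
    have hv : (((x.toNat : Int) - 32).toNat < 0xd800) := by omega
    have hc : ((((x.toNat : Int) - 32).toNat : Int)) = (x.toNat : Int) - 32 := by omega
    simp only [hl, if_true]
    rw [toNat_ofNat_of_lt _ hv, hc]
    split_ifs with h
    · rfl
    · congr 2
      ring
  · have hu : PySem.Chars.isupper x = true := by
      simp [PySem.Chars.isalpha] at ha
      rcases ha with h | h
      · exact h
      · exact absurd h hl
    obtain ⟨h1, h2⟩ := upper_bounds hu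
    have hv : (((x.toNat : Int) + 32).toNat < 0xd800) := by omega
    have hc : ((((x.toNat : Int) + 32).toNat : Int)) = (x.toNat : Int) + 32 := by omega
    rw [Bool.not_eq_true] at hl
    simp only [hl, Bool.false_eq_true, if_false]
    rw [toNat_ofNat_of_lt _ hv, hc]
    split_ifs with h
    · rfl
    · congr 2
      ring

-- ===== VERDICT (by name: the statement is the Claim_ definition above) =====
theorem mystery_code_spec : Claim_equal_mystery_code := by
  intro s shift _ hpre
  unfold Pre_mystery_code at hpre
  rw [List.all_eq_true] at hpre
  unfold Spec_mystery_code mystery_code mystery_code_alt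
  rw [foldlA]
  simp only [List.nil_append]
  congr 1
  apply List.map_congr_left
  intro x hx
  rw [getD_build]
  by_cases ha : PySem.Chars.isalpha x = true
  · rw [if_pos ⟨(PySem.Set.mem_ofList _ _).mpr hx, ha⟩]
    have h := hpre x hx
    rw [ha] at h
    simp only [Bool.not_true, Bool.false_or, decide_eq_true_eq] at h
    exact mcA_eq_mcImage shift x ha h
  · rw [if_neg (by simp [ha])]
    simp [mcA, ha, PySem.Dict.getD_empty]
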